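-- pv_equiv track=rewrite | github.com/ARCANA-Research/MASTODON | src/device-model-plugins/verilogA_parser.py | extract_variable
-- ===== SOURCE A (Python) =====
-- def extract_variable(expression,variable_name):
--   expression = expression.replace(" ","")
--   expression = expression + " "
--
--   table = expression.maketrans("=+*/-<>]&|!([)",",,,,,,,,,,,,,,")
--   modified_exp = expression.translate(table)
--
--   vars = modified_exp.split(",")
--
--   for i in range(len(vars)):
--     vars[i] = vars[i].strip()
--
--   vars = list(set(vars))
--   vars = [i for i in vars if i]
--   vars = list(set(vars)&set(variable_name))
--
--   expression_characters = [char for char in expression]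
--
--   variable_location = {new_list: [] for new_list in vars}
--
--   for var in vars:
--     L = len(var)
--     for i in range(L,len(expression_characters)+1):
--       if var == ''.join(expression_characters[i-L:i]) and expression_characters[i-L-1].isalpha() == False and expression_characters[i-L-1] != '_' and expression_characters[i].isalpha() == False and expression_characters[i] != '_' and var in variable_name:
--         variable_location[var].append(i-L)
--
--   locations = []
--
--   for var in variable_location:
--     for loc in variable_location[var]:
--       locations.append(loc)
--
--   locations.sort()
--   count = 0
--
--   new_expression = expression
--
--   for loc in locations:
--     new_expression = expression[0:loc+count*5] + "self." + expression[loc+count*5:]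
--     expression = new_expression
--     count = count + 1
--
--   return new_expression
-- ===== SOURCE B (Python) =====
-- def extract_variable(expression, variable_name):
--     s = expression.replace(" ", "") + " "
--     delims = frozenset("=+*/-<>]&|!([),")
--     names = set(variable_name)
--
--     # one pass over s: collect the delimiter-separated runs, strip each; keep the
--     # known variable names, indexed by their first character
--     byfirst = {}
--     cur = []
--     for ch in s:
--         if ch in delims:
--             tok = "".join(cur).strip()
--             if tok and tok in names:
--                 byfirst.setdefault(tok[0], set()).add(tok)
--             cur = []
--         else:
--             cur.append(ch)
--     tok = "".join(cur).strip()
--     if tok and tok in names: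
--         byfirst.setdefault(tok[0], set()).add(tok)
--
--     def ident(c):
--         return c.isalpha() or c == '_'
--
--     # second pass: emit the output directly, prefixing "self." once per variable
--     # that starts at this position with non-identifier characters on both sides
--     out = []
--     for p in range(len(s)):
--         c = s[p]
--         if not ident(s[p - 1]) and c in byfirst:
--             for v in byfirst[c]:
--                 L = len(v)
--                 if s[p:p + L] == v and not ident(s[p + L]):
--                     out.append("self.")
--         out.append(c)
--     return "".join(out)
-- ===== Notes on version B (the rewrite author's own statement) =====
-- stated objective: alternative
-- what changed: B never builds, sorts or splices a location list: one pass over the string collects the delimiter-separated tokens into a dict of variable sets keyed by first character, and a second pass emits the output string directly, prefixing 'self.' at a position exactly when a variable from the dict entry for the current character matches there, so no per-variable whole-string scan, no sort and no repeated re-slicing of the expression.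
import Mathlib
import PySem

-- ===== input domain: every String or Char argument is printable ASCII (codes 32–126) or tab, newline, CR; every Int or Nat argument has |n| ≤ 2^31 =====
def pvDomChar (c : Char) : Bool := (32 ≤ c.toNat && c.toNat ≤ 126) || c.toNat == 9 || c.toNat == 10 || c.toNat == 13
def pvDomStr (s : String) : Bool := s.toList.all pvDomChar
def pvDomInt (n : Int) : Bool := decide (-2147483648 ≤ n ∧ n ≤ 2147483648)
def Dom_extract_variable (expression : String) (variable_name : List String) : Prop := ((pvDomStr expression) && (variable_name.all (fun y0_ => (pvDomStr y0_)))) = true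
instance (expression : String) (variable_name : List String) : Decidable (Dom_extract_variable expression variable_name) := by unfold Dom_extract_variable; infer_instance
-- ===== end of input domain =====

-- B replaces A's per-variable whole-string scan plus sort-and-splice by one tokenizing
-- pass into a first-character dict index and one direct output-emitting pass (objective:
-- alternative structure).

-- ===== PORT A =====
-- the characters A's maketrans table sends to ','
def pvDelims : List Char := "=+*/-<>]&|!([)".toList

-- `c.isalpha() == False and c != '_'` read through pyGet? (none is unreachable: Python
-- would raise IndexError there, which never happens on A's short-circuited reads)
def pvBoundary (o : Option Char) : Bool :=
  match o with
  | some c => !PySem.Chars.isalpha c && c != '_'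
  | none => false

-- A's inner loop `for i in range(L, len(expression_characters)+1): …` for one var
def aScanVar (cs : List Char) (names : List (List Char)) (var : List Char) : List Int :=
  let L : Int := var.length
  let n : Int := cs.length
  (PySem.List.pyRange L (n + 1) 1).foldl (fun acc i =>
    if (PySem.List.slice cs (some (i - L)) (some i) == var
        && pvBoundary (PySem.List.pyGet? cs (i - L - 1))
        && pvBoundary (PySem.List.pyGet? cs i)
        && decide (var ∈ names)) then acc ++ [i - L] else acc) []

def extract_variable (expression : String) (variable_name : List String) : String :=
  let names := variable_name.map String.toList
  let cs := (PySem.Str.replace expression " " "").toList ++ [' ']   -- replace(" ","") + " "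
  let modified := cs.map (fun c => if c ∈ pvDelims then ',' else c) -- translate(table)
  let vars0 := PySem.Chars.splitOn modified [',']                   -- split(",")
  let vars1 := vars0.map PySem.Chars.strip
  let vars2 := PySem.Set.ofList vars1                               -- list(set(vars))
  let vars3 := vars2.filter (fun v => !v.isEmpty)                   -- [i for i in vars if i]
  let vars := PySem.Set.inter (PySem.Set.ofList vars3) (PySem.Set.ofList names)
  -- variable_location dict as an association list (each key's list is filled by its own scan)
  let variable_location := vars.map (fun var => (var, aScanVar cs names var))
  let locations := variable_location.foldl (fun acc kv => acc ++ kv.2) []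
  let locations := PySem.List.sorted locations (fun x => x) false
  let fin := locations.foldl (fun (st : List Char × Int) loc =>
      (PySem.List.slice st.1 none (some (loc + st.2 * 5)) ++ "self.".toList
         ++ PySem.List.slice st.1 (some (loc + st.2 * 5)) none, st.2 + 1)) (cs, (0 : Int))
  String.ofList fin.1

-- ===== PORT B =====
-- B's delimiter set (A's table characters plus ',' itself)
def bDelims : List Char := "=+*/-<>]&|!([),".toList

-- `ident(c)` of Source B
def bIdent (c : Char) : Bool := PySem.Chars.isalpha c || c == '_'

-- `not ident(s[i])` read through pyGet? (none = IndexError, unreachable on B's reads)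
def bNotIdent (o : Option Char) : Bool :=
  match o with
  | some c => !bIdent c
  | none => false

-- `tok = "".join(cur).strip(); if tok and tok in names: byfirst.setdefault(tok[0], set()).add(tok)`
def bNote (names : List (List Char)) (d : PySem.Dict Char (PySem.Set (List Char)))
    (cur : List Char) : PySem.Dict Char (PySem.Set (List Char)) :=
  match PySem.Chars.strip cur with
  | [] => d
  | c :: rest =>
    if (c :: rest) ∈ names then
      d.insert c (PySem.Set.add (d.getD c PySem.Set.empty) (c :: rest))
    else d

-- the body of Source B's output loop at position p
def bEmit (cs : List Char) (byfirst : PySem.Dict Char (PySem.Set (List Char)))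
    (acc : List Char) (p : Int) : List Char :=
  match PySem.List.pyGet? cs p with
  | none => acc      -- unreachable: p ∈ [0, len)
  | some c =>
    acc ++
      (if bNotIdent (PySem.List.pyGet? cs (p - 1)) then
        match byfirst.get? c with
        | some vs =>
          vs.foldl (fun a v =>
            if PySem.List.slice cs (some p) (some (p + (v.length : Int))) == v
               && bNotIdent (PySem.List.pyGet? cs (p + (v.length : Int)))
            then a ++ "self.".toList else a) []
        | none => []
      else []) ++ [c]

def extract_variable_alt (expression : String) (variable_name : List String) : String :=
  let cs := (PySem.Str.replace expression " " "").toList ++ [' ']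
  let names := variable_name.map String.toList
  -- first pass: group the known variables among the delimiter-separated runs by first char
  let st := cs.foldl
    (fun (st : PySem.Dict Char (PySem.Set (List Char)) × List Char) ch =>
      if ch ∈ bDelims then (bNote names st.1 st.2, []) else (st.1, st.2 ++ [ch]))
    (PySem.Dict.empty, [])
  let byfirst := bNote names st.1 st.2
  -- second pass: emit the output directly, one "self." per variable starting here
  -- (each match contributes the same constant piece, so the set's order cannot matter)
  let out := (PySem.List.pyRange 0 (cs.length : Int) 1).foldl (bEmit cs byfirst) []
  String.ofList out

-- ===== PRECONDITION & SPEC =====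
def Spec_extract_variable (expression : String) (variable_name : List String) (out : String) : Prop := out = extract_variable_alt expression variable_name
instance (expression : String) (variable_name : List String) (out : String) : Decidable (Spec_extract_variable expression variable_name out) := by unfold Spec_extract_variable; infer_instance

-- ===== CLAIM (what is proved, stated in full; the proofs are below) =====
def Claim_equal_extract_variable : Prop := ∀ (expression : String) (variable_name : List String), Dom_extract_variable expression variable_name → Spec_extract_variable expression variable_name (extract_variable expression variable_name)

-- ===== LEMMAS AND PROOFS =====

-- the two boundary readers are the same test
lemma bNotIdent_eq_pvBoundary (o : Option Char) : bNotIdent o = pvBoundary o := by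
  cases o with
  | none => rfl
  | some c => simp [bNotIdent, bIdent, pvBoundary, Bool.not_or, bne]

-- ---------- tokenizer equivalence ----------

-- prepend a run to the first piece
def consHead (p : List Char) : List (List Char) → List (List Char)
  | [] => [p]
  | h :: r => (p ++ h) :: r

-- reference splitter on a character predicate
def pSplit (q : Char → Bool) : List Char → List (List Char)
  | [] => [[]]
  | c :: t => if q c then [] :: pSplit q t else consHead [c] (pSplit q t)

lemma pSplit_ne_nil (q : Char → Bool) (l : List Char) : pSplit q l ≠ [] := by
  cases l with
  | nil => simp [pSplit]
  | cons c t =>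
    simp only [pSplit]
    split
    · simp
    · cases pSplit q t <;> simp [consHead]

lemma consHead_nil_of_ne (ps : List (List Char)) (h : ps ≠ []) : consHead [] ps = ps := by
  cases ps with
  | nil => exact absurd rfl h
  | cons a r => simp [consHead]

lemma consHead_consHead (p : List Char) (c : Char) (ps : List (List Char)) :
    consHead p (consHead [c] ps) = consHead (p ++ [c]) ps := by
  cases ps <;> simp [consHead]

lemma splitOn_go_eq (d : Char) (fuel : Nat) : ∀ (l cur : List Char) (accs : List (List Char)),
    l.length < fuel →
    PySem.Chars.splitOn.go [d] fuel l cur accs =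
      accs.reverse ++ consHead cur.reverse (pSplit (fun c => c == d) l) := by
  induction fuel with
  | zero => intro l cur accs h; omega
  | succ fuel ih =>
    intro l cur accs h
    cases l with
    | nil => simp [PySem.Chars.splitOn.go, pSplit, consHead]
    | cons c rest =>
      by_cases hc : c = d
      · subst hc
        have h1 : [c].isPrefixOf (c :: rest) = true := by simp [List.isPrefixOf]
        rw [PySem.Chars.splitOn.go, if_pos h1]
        simp only [List.length_singleton, List.drop_one, List.tail_cons]
        rw [ih rest [] (cur.reverse :: accs) (by simpa using Nat.lt_of_succ_lt_succ h)]
        simp only [List.reverse_nil]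
        rw [consHead_nil_of_ne _ (pSplit_ne_nil _ _)]
        simp [pSplit, consHead]
      · have h1 : [d].isPrefixOf (c :: rest) = false := by
          simp [List.isPrefixOf]
          exact fun hh => absurd hh.symm hc
        rw [PySem.Chars.splitOn.go, if_neg (by simp [h1])]
        rw [ih rest (c :: cur) accs (by simpa using Nat.lt_of_succ_lt_succ h)]
        have hq : (c == d) = false := by simpa using hc
        simp only [pSplit, hq, List.reverse_cons, Bool.false_eq_true, if_false]
        rw [consHead_consHead]

lemma splitOn_eq_pSplit (d : Char) (l : List Char) :
    PySem.Chars.splitOn l [d] = pSplit (fun c => c == d) l := by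
  rw [PySem.Chars.splitOn, splitOn_go_eq d (l.length + 1) l [] [] (by omega)]
  simp [consHead_nil_of_ne _ (pSplit_ne_nil _ _)]

lemma pSplit_map_translate (cs : List Char) :
    pSplit (fun c => c == ',') (cs.map (fun c => if c ∈ pvDelims then ',' else c))
      = pSplit (fun c => decide (c ∈ bDelims)) cs := by
  induction cs with
  | nil => rfl
  | cons c t ih =>
    have hmem : c ∈ bDelims ↔ c ∈ pvDelims ∨ c = ',' := by
      simp [bDelims, pvDelims]
      tauto
    by_cases hb : c ∈ bDelims
    · have hkey : ((if c ∈ pvDelims then ',' else c) == ',') = true := by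
        rcases hmem.mp hb with h | h
        · simp [h]
        · simp [h]
      simp only [List.map_cons, pSplit, hkey, hb, decide_true, if_true, ih]
    · have hnp : c ∉ pvDelims := fun h => hb (hmem.mpr (Or.inl h))
      have hnc : (c == ',') = false := by
        simp only [beq_eq_false_iff_ne, ne_eq]
        exact fun h => hb (hmem.mpr (Or.inr h))
      simp only [List.map_cons, pSplit, hnp, if_false, hnc, hb, decide_false,
        Bool.false_eq_true, ih]

-- ---------- B's first pass: the flushed run fold processes the pSplit pieces ----------

lemma bTokens_flush (names : List (List Char)) :
    ∀ (l : List Char) (d : PySem.Dict Char (PySem.Set (List Char))) (cur : List Char),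
    bNote names
        (l.foldl (fun (st : PySem.Dict Char (PySem.Set (List Char)) × List Char) ch =>
          if ch ∈ bDelims then (bNote names st.1 st.2, []) else (st.1, st.2 ++ [ch])) (d, cur)).1
        (l.foldl (fun (st : PySem.Dict Char (PySem.Set (List Char)) × List Char) ch =>
          if ch ∈ bDelims then (bNote names st.1 st.2, []) else (st.1, st.2 ++ [ch])) (d, cur)).2
      = (consHead cur (pSplit (fun c => decide (c ∈ bDelims)) l)).foldl (bNote names) d := by
  intro l
  induction l with
  | nil =>
    intro d cur
    simp [pSplit, consHead]
  | cons ch t ih =>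
    intro d cur
    by_cases hch : ch ∈ bDelims
    · simp only [List.foldl_cons, if_pos hch]
      rw [ih (bNote names d cur) []]
      simp only [pSplit, hch, decide_true, if_true]
      rw [consHead_nil_of_ne _ (pSplit_ne_nil _ _)]
      simp [consHead]
    · simp only [List.foldl_cons, if_neg hch]
      rw [ih d (cur ++ [ch])]
      simp only [pSplit, hch, decide_false, Bool.false_eq_true, if_false]
      rw [consHead_consHead]

-- B's per-character bucket
def Bf (d : PySem.Dict Char (PySem.Set (List Char))) (h : Char) : List (List Char) :=
  (d.get? h).getD []

lemma byfirst_inv (names : List (List Char)) :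
    ∀ (pieces : List (List Char)) (d : PySem.Dict Char (PySem.Set (List Char))),
    (∀ h, (Bf d h).Nodup) →
    (∀ h, (Bf (pieces.foldl (bNote names) d) h).Nodup) ∧
    (∀ h v, v ∈ Bf (pieces.foldl (bNote names) d) h ↔
      v ∈ Bf d h ∨ (v ∈ pieces.map PySem.Chars.strip ∧ v ≠ [] ∧ v ∈ names ∧ v.head? = some h)) := by
  intro pieces
  induction pieces with
  | nil =>
    intro d hnd
    exact ⟨hnd, fun h v => by simp⟩
  | cons piece rest ih =>
    intro d hnd
    have hstep : ∀ h,
        Bf (bNote names d piece) h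
          = if hp : (PySem.Chars.strip piece ≠ [] ∧ PySem.Chars.strip piece ∈ names
                      ∧ (PySem.Chars.strip piece).head? = some h)
            then PySem.Set.add (Bf d h) (PySem.Chars.strip piece)
            else Bf d h := by
      intro h
      unfold bNote
      cases hsp : PySem.Chars.strip piece with
      | nil => rw [dif_neg (by simp)]
      | cons c restc =>
        by_cases hn : (c :: restc) ∈ names
        · simp only [if_pos hn]
          by_cases hc : h = c
          · subst hc
            rw [dif_pos ⟨by simp, hn, by simp⟩]
            unfold Bf
            rw [PySem.Dict.get?_insert_self, PySem.Dict.getD_eq_get?_getD]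
            rfl
          · have hcond : ¬ ((c :: restc) ≠ [] ∧ (c :: restc) ∈ names
                ∧ (c :: restc).head? = some h) := by
              rintro ⟨-, -, hh⟩
              simp only [List.head?_cons, Option.some_inj] at hh
              exact hc hh.symm
            rw [dif_neg hcond]
            simp only [Bf, PySem.Dict.get?_insert]
            rw [if_neg hc]
        · simp only [if_neg hn]
          rw [dif_neg (fun hh => hn hh.2.1)]
    have hnd' : ∀ h, (Bf (bNote names d piece) h).Nodup := by
      intro h
      rw [hstep h]
      split
      · exact PySem.Set.nodup_add _ _ (hnd h)
      · exact hnd h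
    obtain ⟨ihnd, ihmem⟩ := ih (bNote names d piece) hnd'
    refine ⟨by simpa using ihnd, fun h v => ?_⟩
    simp only [List.foldl_cons]
    rw [ihmem h v, hstep h]
    constructor
    · rintro (hv | hv)
      · split at hv
        · next hp =>
          rw [PySem.Set.mem_add _ _ _] at hv
          rcases hv with hv | hv
          · exact Or.inl hv
          · subst hv
            exact Or.inr ⟨by simp, hp.1, hp.2.1, hp.2.2⟩
        · exact Or.inl hv
      · exact Or.inr ⟨by simp [hv.1], hv.2.1, hv.2.2.1, hv.2.2.2⟩
    · rintro (hv | ⟨hmem, hne, hnm, hhd⟩)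
      · refine Or.inl ?_
        split
        · exact (PySem.Set.mem_add _ _ _).mpr (Or.inl hv)
        · exact hv
      · simp only [List.map_cons, List.mem_cons] at hmem
        rcases hmem with hmem | hmem
        · refine Or.inl ?_
          rw [dif_pos (by rw [← hmem]; exact ⟨hne, hnm, hhd⟩)]
          exact (PySem.Set.mem_add _ _ _).mpr (Or.inr hmem)
        · exact Or.inr ⟨hmem, hne, hnm, hhd⟩

-- ---------- the match positions, shared reference form ----------

-- the condition both programs test at a start position
def pvCond (cs var : List Char) (s : Nat) : Bool :=
  decide (var <+: cs.drop s)
    && pvBoundary (PySem.List.pyGet? cs ((s : Int) - 1))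
    && pvBoundary (PySem.List.pyGet? cs ((s : Int) + var.length))

def matchesAux (cs var : List Char) : Nat → Nat → List Int
  | 0, _ => []
  | k + 1, s => (if pvCond cs var s then [(s : Int)] else []) ++ matchesAux cs var k (s + 1)

lemma matchesAux_add (cs var : List Char) (j k s : Nat) :
    matchesAux cs var (j + k) s = matchesAux cs var j s ++ matchesAux cs var k (s + j) := by
  induction j generalizing s with
  | zero => simp [matchesAux]
  | succ j ih =>
    have : j + 1 + k = (j + k) + 1 := by omega
    rw [this]
    simp only [matchesAux, ih (s + 1), List.append_assoc]
    have : s + 1 + j = s + (j + 1) := by omega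
    rw [this]

lemma cond_false_of_short (cs var : List Char) (hv : var ≠ []) (s : Nat) (h : cs.length < s + var.length) :
    pvCond cs var s = false := by
  have hnp : ¬ var <+: cs.drop s := by
    intro hp
    have := hp.length_le
    have hv1 : var.length ≠ 0 := by simpa using hv
    simp [List.length_drop] at this
    omega
  simp [pvCond, hnp]

lemma matchesAux_nil_of_short (cs var : List Char) (hv : var ≠ []) (k : Nat) :
    ∀ s, cs.length < s + var.length → matchesAux cs var k s = [] := by
  induction k with
  | zero => intro s _; rfl
  | succ k ih =>
    intro s hs
    simp only [matchesAux, cond_false_of_short cs var hv s hs, Bool.false_eq_true, if_false,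
      List.nil_append]
    exact ih (s + 1) (by omega)

lemma mem_matchesAux (cs var : List Char) (k : Nat) :
    ∀ s x, x ∈ matchesAux cs var k s →
      ∃ m : Nat, x = (m : Int) ∧ s ≤ m ∧ m < s + k ∧ pvCond cs var m = true := by
  induction k with
  | zero => intro s x hx; simp [matchesAux] at hx
  | succ k ih =>
    intro s x hx
    simp only [matchesAux, List.mem_append] at hx
    rcases hx with hx | hx
    · by_cases hc : pvCond cs var s = true
      · simp only [hc, if_true, List.mem_singleton] at hx
        exact ⟨s, hx, le_rfl, by omega, hc⟩
      · simp [hc] at hx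
    · obtain ⟨m, hm, h1, h2, h3⟩ := ih (s + 1) x hx
      exact ⟨m, hm, by omega, by omega, h3⟩

lemma count_matchesAux (cs var : List Char) (k : Nat) :
    ∀ (s m : Nat), (matchesAux cs var k s).count ((m : Nat) : Int)
      = if s ≤ m ∧ m < s + k ∧ pvCond cs var m then 1 else 0 := by
  induction k with
  | zero =>
    intro s m
    simp only [matchesAux, List.count_nil]
    rw [if_neg (by omega)]
  | succ k ih =>
    intro s m
    simp only [matchesAux, List.count_append, ih (s + 1) m]
    have hhead : (if pvCond cs var s then [((s : Nat) : Int)] else []).count ((m : Nat) : Int)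
        = if m = s ∧ pvCond cs var s then 1 else 0 := by
      by_cases hc : pvCond cs var s = true
      · simp only [hc, if_true, and_true]
        by_cases hms : m = s
        · subst hms; simp
        · have hne : (((s : Nat) : Int) == ((m : Nat) : Int)) = false := by
            simp only [beq_eq_false_iff_ne, ne_eq, Int.natCast_inj]
            omega
          simp only [List.count_singleton, hne, Bool.false_eq_true, if_false]
          rw [if_neg hms]
      · simp [hc]
    rw [hhead]
    by_cases hc : pvCond cs var m = true
    · by_cases hms : m = s
      · subst hms
        rw [if_pos ⟨rfl, hc⟩, if_neg (by omega), if_pos ⟨le_rfl, by omega, hc⟩]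
      · have hA : ¬ (m = s ∧ pvCond cs var s = true) := fun h => hms h.1
        rw [if_neg hA, Nat.zero_add]
        have hiff : (s + 1 ≤ m ∧ m < s + 1 + k ∧ pvCond cs var m = true)
            ↔ (s ≤ m ∧ m < s + (k + 1) ∧ pvCond cs var m = true) := by
          constructor <;> rintro ⟨a, b, c2⟩ <;> exact ⟨by omega, by omega, c2⟩
        rw [if_congr hiff rfl rfl]
    · have hA : ¬ (m = s ∧ pvCond cs var s = true) := by
        rintro ⟨he, hp⟩
        subst he
        exact hc hp
      rw [if_neg hA, if_neg (fun h => hc h.2.2), if_neg (fun h => hc h.2.2)]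

-- A's scan for one var is matchesAux over every start position
lemma aScan_go (cs var : List Char) (names : List (List Char)) (hn : var ∈ names) :
    ∀ (k : Nat) (a : Int) (acc : List Int), (var.length : Int) ≤ a → a + k = (cs.length : Int) + 1 →
    (PySem.List.pyRange a ((cs.length : Int) + 1) 1).foldl (fun acc i =>
      if (PySem.List.slice cs (some (i - (var.length : Int))) (some i) == var
          && pvBoundary (PySem.List.pyGet? cs (i - (var.length : Int) - 1))
          && pvBoundary (PySem.List.pyGet? cs i)
          && decide (var ∈ names)) then acc ++ [i - (var.length : Int)] else acc) acc
      = acc ++ matchesAux cs var k (a - (var.length : Int)).toNat := by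
  intro k
  induction k with
  | zero =>
    intro a acc hLa hak
    rw [PySem.List.pyRange_one_eq_nil (by omega)]
    simp [matchesAux]
  | succ k ih =>
    intro a acc hLa hak
    have ha : a < (cs.length : Int) + 1 := by omega
    rw [PySem.List.pyRange_one_cons ha]
    set s := (a - (var.length : Int)).toNat with hs
    have hsa : (s : Int) = a - (var.length : Int) := Int.toNat_of_nonneg (by omega)
    have hsl : PySem.List.slice cs (some (a - (var.length : Int))) (some a)
        = (cs.drop s).take var.length := by
      rw [PySem.List.slice_toNat cs (by omega) (by omega : (0:Int) ≤ a)]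
      congr 1
      omega
    have hpq : (((cs.drop s).take var.length == var)) = decide (var <+: cs.drop s) := by
      rw [Bool.eq_iff_iff]
      simp only [beq_iff_eq, decide_eq_true_eq]
      exact ⟨fun h => List.prefix_iff_eq_take.mpr h.symm, fun h => (List.prefix_iff_eq_take.mp h).symm⟩
    have e1 : a - (var.length : Int) - 1 = (s : Int) - 1 := by omega
    have e2 : a = (s : Int) + (var.length : Int) := by omega
    have hb : (PySem.List.slice cs (some (a - (var.length : Int))) (some a) == var
          && pvBoundary (PySem.List.pyGet? cs (a - (var.length : Int) - 1))
          && pvBoundary (PySem.List.pyGet? cs a)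
          && decide (var ∈ names)) = pvCond cs var s := by
      rw [hsl, hpq, e1, pvCond, e2]
      simp [hn]
    simp only [List.foldl_cons, hb]
    have hnext : ((a + 1) - (var.length : Int)).toNat = s + 1 := by omega
    by_cases hcnd : pvCond cs var s = true
    · rw [if_pos hcnd]
      rw [ih (a + 1) (acc ++ [a - (var.length : Int)]) (by omega) (by omega), hnext]
      simp only [matchesAux, hcnd, if_true, ← hsa]
      simp [List.append_assoc]
    · rw [if_neg hcnd]
      rw [ih (a + 1) acc (by omega) (by omega), hnext]
      simp only [matchesAux]
      rw [if_neg hcnd]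
      simp

lemma aScanVar_eq (cs var : List Char) (names : List (List Char))
    (hv : var ≠ []) (hn : var ∈ names) :
    aScanVar cs names var = matchesAux cs var (cs.length + 1) 0 := by
  simp only [aScanVar]
  by_cases hL : (var.length : Int) ≤ (cs.length : Int) + 1
  · rw [aScan_go cs var names hn (cs.length + 1 - var.length) (var.length : Int) [] le_rfl
      (by omega)]
    have h0 : ((var.length : Int) - (var.length : Int)).toNat = 0 := by omega
    rw [h0]
    have hsplit : cs.length + 1 = (cs.length + 1 - var.length) + var.length := by omega
    nth_rewrite 2 [hsplit]
    rw [matchesAux_add]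
    rw [matchesAux_nil_of_short cs var hv var.length (0 + (cs.length + 1 - var.length)) (by omega)]
    simp
  · rw [PySem.List.pyRange_one_eq_nil (by omega)]
    rw [matchesAux_nil_of_short cs var hv (cs.length + 1) 0 (by omega)]
    rfl

-- ---------- A's splice loop, turned front-to-back and then per-position ----------

lemma buildEq (cs : List Char) :
    ∀ (locs : List Int) (acc : List Char) (prev c : Int),
    locs.Pairwise (· ≤ ·) → (∀ p ∈ locs, prev ≤ p ∧ p ≤ (cs.length : Int)) →
    0 ≤ prev → 0 ≤ c → (acc.length : Int) = prev + 5 * c →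
    (locs.foldl (fun (st : List Char × Int) loc =>
        (PySem.List.slice st.1 none (some (loc + st.2 * 5)) ++ "self.".toList
           ++ PySem.List.slice st.1 (some (loc + st.2 * 5)) none, st.2 + 1))
        (acc ++ cs.drop prev.toNat, c)).1
      = (locs.foldl (fun (st : List Char × Int) p =>
          (st.1 ++ PySem.List.slice cs (some st.2) (some p) ++ "self.".toList, p)) (acc, prev)).1
        ++ PySem.List.slice cs (some ((locs.foldl (fun (st : List Char × Int) p =>
          (st.1 ++ PySem.List.slice cs (some st.2) (some p) ++ "self.".toList, p)) (acc, prev)).2)) none := by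
  intro locs
  induction locs with
  | nil =>
    intro acc prev c _ _ hprev _ _
    simp only [List.foldl_nil]
    rw [PySem.List.slice_from cs hprev]
  | cons p rest ih =>
    intro acc prev c hpw hbd hprev hc hlen
    have hp := hbd p List.mem_cons_self
    have h0p : 0 ≤ p := le_trans hprev hp.1
    have hx : 0 ≤ p + c * 5 := by omega
    have hdlen : (List.drop prev.toNat cs).length = cs.length - prev.toNat := by
      simp [List.length_drop]
    have hslen : (PySem.List.slice cs (some prev) (some p)).length = p.toNat - prev.toNat := by
      rw [PySem.List.slice_toNat cs hprev h0p]
      simp [List.length_take, hdlen]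
      omega
    have hxall : (p + c * 5).toNat = acc.length + (p.toNat - prev.toNat) := by omega
    have e1 : PySem.List.slice (acc ++ List.drop prev.toNat cs) none (some (p + c * 5))
        = acc ++ PySem.List.slice cs (some prev) (some p) := by
      rw [PySem.List.slice_to _ hx, hxall, List.take_append]
      rw [List.take_of_length_le (Nat.le_add_right _ _)]
      rw [Nat.add_sub_cancel_left]
      rw [PySem.List.slice_toNat cs hprev h0p]
    have e2 : PySem.List.slice (acc ++ List.drop prev.toNat cs) (some (p + c * 5)) none
        = List.drop p.toNat cs := by
      rw [PySem.List.slice_from _ hx, hxall, List.drop_append]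
      rw [List.drop_eq_nil_of_le (Nat.le_add_right _ _)]
      rw [Nat.add_sub_cancel_left, List.drop_drop]
      rw [show prev.toNat + (p.toNat - prev.toNat) = p.toNat from by omega]
      simp
    simp only [List.foldl_cons, e1, e2]
    have hpr := List.pairwise_cons.mp hpw
    have := ih (acc ++ PySem.List.slice cs (some prev) (some p) ++ "self.".toList) p (c + 1)
      hpr.2
      (fun q hq => ⟨hpr.1 q hq, (hbd q (List.mem_cons_of_mem _ hq)).2⟩)
      h0p (by omega)
      (by
        simp only [List.length_append, hslen]
        have h5 : ("self.".toList).length = 5 := rfl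
        rw [h5]
        push_cast
        omega)
    simp only [List.append_assoc] at this ⊢
    exact this

-- "self." repeated k times
def selfRep (k : Nat) : List Char := (List.replicate k ("self.".toList)).flatten

-- the piecewise tail of the spliced string, over Nat positions
def pwTail (cs : List Char) : List Nat → Nat → List Char
  | [], prev => cs.drop prev
  | q :: rest, prev => (cs.drop prev).take (q - prev) ++ "self.".toList ++ pwTail cs rest q

lemma pwFold (cs : List Char) :
    ∀ (ln : List Nat) (prev : Nat) (acc : List Char),
    (((ln.map (fun m : Nat => (m : Int))).foldl (fun (st : List Char × Int) p =>
        (st.1 ++ PySem.List.slice cs (some st.2) (some p) ++ "self.".toList, p))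
      (acc, (prev : Int))).1)
      ++ PySem.List.slice cs (some (((ln.map (fun m : Nat => (m : Int))).foldl
        (fun (st : List Char × Int) p =>
          (st.1 ++ PySem.List.slice cs (some st.2) (some p) ++ "self.".toList, p))
        (acc, (prev : Int))).2)) none
      = acc ++ pwTail cs ln prev := by
  intro ln
  induction ln with
  | nil =>
    intro prev acc
    simp only [List.map_nil, List.foldl_nil, pwTail]
    rw [PySem.List.slice_from_natCast]
  | cons q rest ih =>
    intro prev acc
    simp only [List.map_cons, List.foldl_cons]
    rw [PySem.List.slice_natCast]
    rw [ih q (acc ++ ((cs.drop prev).take (q - prev)) ++ "self.".toList)]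
    simp [pwTail]

lemma map_range'_getD (cs : List Char) :
    ∀ (prev : Nat), prev ≤ cs.length →
    (List.range' prev (cs.length - prev)).map (fun p => cs.getD p ' ') = cs.drop prev := by
  intro prev hprev
  apply List.ext_getElem
  · simp
  · intro i h1 h2
    simp only [List.getElem_map, List.getElem_range', one_mul, List.getElem_drop]
    simp only [List.length_map, List.length_range'] at h1
    rw [List.getD_eq_getElem cs ' ' (by omega)]

lemma flatMap_congr_mem {α β : Type} (l : List α) (f g : α → List β)
    (h : ∀ x ∈ l, f x = g x) : l.flatMap f = l.flatMap g := by
  induction l with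
  | nil => rfl
  | cons x t ih =>
    simp only [List.flatMap_cons, h x List.mem_cons_self,
      ih (fun y hy => h y (List.mem_cons_of_mem _ hy))]

lemma pw_flatten (cs : List Char) :
    ∀ (fuel : Nat) (ln : List Nat) (prev : Nat),
    ln.length + (cs.length - prev) ≤ fuel →
    ln.Pairwise (· ≤ ·) → (∀ q ∈ ln, prev ≤ q ∧ q < cs.length) → prev ≤ cs.length →
    pwTail cs ln prev
      = (List.range' prev (cs.length - prev)).flatMap
          (fun p => selfRep (ln.count p) ++ [cs.getD p ' ']) := by
  intro fuel
  induction fuel with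
  | zero =>
    intro ln prev hf hpw hbd hple
    have hln : ln = [] := by
      cases ln with
      | nil => rfl
      | cons a t => simp at hf
    subst hln
    have h0 : cs.length - prev = 0 := by omega
    have hle : cs.length ≤ prev := by omega
    simp [pwTail, h0, List.drop_eq_nil_of_le hle]
  | succ fuel ih =>
    intro ln prev hf hpw hbd hple
    cases ln with
    | nil =>
      rw [pwTail]
      rw [show (fun p => selfRep (List.count p []) ++ [cs.getD p ' '])
          = (fun p => [cs.getD p ' ']) from by funext p; simp [selfRep]]
      rw [show ∀ l : List Nat, l.flatMap (fun p => [cs.getD p ' ']) = l.map (fun p => cs.getD p ' ')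
          from fun l => by
            induction l with
            | nil => rfl
            | cons a t iht => rw [List.flatMap_cons, iht, List.map_cons]; rfl]
      rw [map_range'_getD cs prev hple]
    | cons q rest =>
      have hq := hbd q List.mem_cons_self
      have hlen0 : 0 < cs.length - prev := by omega
      rw [show cs.length - prev = (cs.length - (prev + 1)) + 1 from by omega, List.range'_succ]
      simp only [List.flatMap_cons]
      by_cases hqp : q = prev
      · subst hqp
        rw [pwTail]
        simp only [Nat.sub_self, List.take_zero, List.nil_append]
        have hcnt : (q :: rest).count q = rest.count q + 1 := by
          rw [List.count_cons]
          simp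
        rw [hcnt]
        have hrep : selfRep (rest.count q + 1) = "self.".toList ++ selfRep (rest.count q) := by
          simp [selfRep, List.replicate_succ]
        rw [hrep]
        have hrest := List.pairwise_cons.mp hpw
        have ihr := ih rest q (by simp at hf ⊢; omega) hrest.2
          (fun x hx => ⟨hrest.1 x hx, (hbd x (List.mem_cons_of_mem _ hx)).2⟩) (by omega)
        rw [ihr]
        rw [show cs.length - q = (cs.length - (q + 1)) + 1 from by omega, List.range'_succ]
        simp only [List.flatMap_cons]
        have hcongr : (List.range' (q + 1) (cs.length - (q + 1))).flatMap
              (fun p => selfRep (rest.count p) ++ [cs.getD p ' '])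
            = (List.range' (q + 1) (cs.length - (q + 1))).flatMap
              (fun p => selfRep ((q :: rest).count p) ++ [cs.getD p ' ']) := by
          refine flatMap_congr_mem _ _ _ (fun p hp => ?_)
          have hpq : q ≠ p := by
            have := List.mem_range'.mp hp
            omega
          rw [List.count_cons]
          simp [hpq]
        rw [hcongr]
        simp [List.append_assoc]
      · -- q > prev: peel one ordinary character
        have hqgt : prev < q := by omega
        have hplt : prev < cs.length := by omega
        have hpeel : pwTail cs (q :: rest) prev = cs[prev] :: pwTail cs (q :: rest) (prev + 1) := by
          simp only [pwTail]
          rw [show q - prev = (q - (prev + 1)) + 1 from by omega]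
          rw [List.drop_eq_getElem_cons hplt, List.take_succ_cons]
          simp only [List.cons_append]
        rw [hpeel]
        have hcnt0 : (q :: rest).count prev = 0 := by
          rw [List.count_eq_zero]
          intro hmem
          rcases List.mem_cons.mp hmem with h | h
          · omega
          · have := List.pairwise_cons.mp hpw
            have := this.1 prev h
            omega
        rw [hcnt0]
        have ihr := ih (q :: rest) (prev + 1) (by simp at hf ⊢; omega) hpw
          (fun x hx => ⟨by
            rcases List.mem_cons.mp hx with h | h
            · omega
            · have h2 := (List.pairwise_cons.mp hpw).1 x h
              omega, (hbd x hx).2⟩) (by omega)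
        rw [ihr]
        simp only [selfRep, List.replicate_zero, List.flatten_nil, List.nil_append]
        rw [List.getD_eq_getElem cs ' ' hplt]
        simp

-- count of a position in a flatMap of per-var position lists
lemma count_flatMap_int (x : Int) :
    ∀ (l : List (List Char)) (f : List Char → List Int),
    (l.flatMap f).count x = (l.map (fun v => (f v).count x)).sum := by
  intro l f
  induction l with
  | nil => rfl
  | cons v t ih => simp [List.flatMap_cons, List.count_append, ih]

lemma sum_map_ite_eq_countP {α : Type} (p : α → Bool) :
    ∀ (l : List α), (l.map (fun v => if p v then 1 else 0)).sum = l.countP p := by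
  intro l
  induction l with
  | nil => rfl
  | cons v t ih =>
    simp only [List.map_cons, List.sum_cons, ih, List.countP_cons]
    by_cases h : p v <;> simp [h] <;> omega

lemma countP_eq_of_nodup_iff {α : Type} [DecidableEq α] (l l' : List α) (p p' : α → Bool)
    (h1 : l.Nodup) (h2 : l'.Nodup)
    (h : ∀ x, (x ∈ l ∧ p x = true) ↔ (x ∈ l' ∧ p' x = true)) :
    l.countP p = l'.countP p' := by
  rw [List.countP_eq_length_filter, List.countP_eq_length_filter]
  have hperm : (l.filter p).Perm (l'.filter p') := by
    rw [List.perm_ext_iff_of_nodup (h1.filter p) (h2.filter p')]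
    intro x
    simp only [List.mem_filter]
    exact h x
  exact hperm.length_eq

-- B's inner loop over one bucket is selfRep of the number of matching vars
lemma bucket_foldl_selfRep (cs : List Char) (p : Int) (vs : List (List Char)) :
    vs.foldl (fun a v =>
        if PySem.List.slice cs (some p) (some (p + (v.length : Int))) == v
           && bNotIdent (PySem.List.pyGet? cs (p + (v.length : Int)))
        then a ++ "self.".toList else a) []
      = selfRep (vs.countP (fun v =>
          PySem.List.slice cs (some p) (some (p + (v.length : Int))) == v
           && bNotIdent (PySem.List.pyGet? cs (p + (v.length : Int))))) := by
  induction vs using List.reverseRecOn with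
  | nil => rfl
  | append_singleton t v ih =>
    rw [List.foldl_append, List.countP_append, ih]
    simp only [List.foldl_cons, List.foldl_nil, List.countP_cons, List.countP_nil, Nat.zero_add]
    by_cases hc : (PySem.List.slice cs (some p) (some (p + (v.length : Int))) == v
         && bNotIdent (PySem.List.pyGet? cs (p + (v.length : Int)))) = true
    · rw [if_pos hc, if_pos hc]
      simp [selfRep, List.replicate_succ']
    · rw [if_neg hc, if_neg hc]
      simp [selfRep]

-- a list of nonnegative ints is a mapped list of nats
lemma natify (l : List Int) (h : ∀ x ∈ l, ∃ m : Nat, x = (m : Int)) :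
    ∃ ln : List Nat, l = ln.map (fun m : Nat => (m : Int)) := by
  induction l with
  | nil => exact ⟨[], rfl⟩
  | cons x t iht =>
    obtain ⟨m, hm⟩ := h x List.mem_cons_self
    obtain ⟨ln, hln⟩ := iht (fun y hy => h y (List.mem_cons_of_mem _ hy))
    exact ⟨m :: ln, by rw [List.map_cons, ← hm, hln]⟩

-- B's emission at one position, given the bucket/vars characterisations
lemma bEmit_flat (cs : List Char) (byfirst : PySem.Dict Char (PySem.Set (List Char)))
    (varsA stripped names : List (List Char))
    (hBnd : ∀ h, (Bf byfirst h).Nodup)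
    (hBmem' : ∀ h v, v ∈ Bf byfirst h ↔ (v ∈ stripped ∧ v ≠ [] ∧ v ∈ names ∧ v.head? = some h))
    (hmemA : ∀ v, v ∈ varsA ↔ (v ∈ stripped ∧ v ≠ [] ∧ v ∈ names))
    (hvarsA_nodup : varsA.Nodup) :
    ∀ (acc : List Char) (k : Nat), k < cs.length →
    bEmit cs byfirst acc ((k : Nat) : Int)
      = acc ++ (selfRep (varsA.countP (fun v => pvCond cs v k)) ++ [cs.getD k ' ']) := by
  intro acc k hkn
  have hget : PySem.List.pyGet? cs ((k : Nat) : Int) = some cs[k] := by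
    rw [PySem.List.pyGet?_natCast]
    exact List.getElem?_eq_getElem hkn
  unfold bEmit
  rw [hget]
  have hgetD : cs.getD k ' ' = cs[k] := List.getD_eq_getElem cs ' ' hkn
  simp only [hgetD, List.append_assoc]
  refine congrArg (HAppend.hAppend acc) ?_
  by_cases hbefore : bNotIdent (PySem.List.pyGet? cs (((k : Nat) : Int) - 1)) = true
  · rw [if_pos hbefore]
    have hbucket :
        (match byfirst.get? cs[k] with
          | some vs =>
            vs.foldl (fun a v =>
              if PySem.List.slice cs (some ((k:Nat):Int)) (some (((k:Nat):Int) + (v.length : Int))) == v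
                 && bNotIdent (PySem.List.pyGet? cs (((k:Nat):Int) + (v.length : Int)))
              then a ++ "self.".toList else a) []
          | none => ([] : List Char))
        = (Bf byfirst cs[k]).foldl (fun a v =>
              if PySem.List.slice cs (some ((k:Nat):Int)) (some (((k:Nat):Int) + (v.length : Int))) == v
                 && bNotIdent (PySem.List.pyGet? cs (((k:Nat):Int) + (v.length : Int)))
              then a ++ "self.".toList else a) [] := by
      unfold Bf
      cases byfirst.get? cs[k] <;> rfl
    rw [hbucket, bucket_foldl_selfRep]
    congr 2
    refine countP_eq_of_nodup_iff _ _ _ _ (hBnd cs[k]) hvarsA_nodup (fun v => ?_)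
    rw [hBmem' cs[k] v, hmemA v]
    constructor
    · rintro ⟨⟨hst, hne, hnm, hhd⟩, hcond⟩
      refine ⟨⟨hst, hne, hnm⟩, ?_⟩
      simp only [Bool.and_eq_true, beq_iff_eq] at hcond
      have hslice : PySem.List.slice cs (some ((k:Nat):Int)) (some (((k:Nat):Int) + ((v.length : Nat) : Int)))
          = (cs.drop k).take v.length := PySem.List.slice_natCast_add cs k v.length
      rw [hslice] at hcond
      have hpre : v <+: cs.drop k := List.prefix_iff_eq_take.mpr hcond.1.symm
      simp only [pvCond, Bool.and_eq_true, decide_eq_true_eq]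
      refine ⟨⟨hpre, ?_⟩, ?_⟩
      · rw [← bNotIdent_eq_pvBoundary]
        exact hbefore
      · rw [← bNotIdent_eq_pvBoundary]
        exact hcond.2
    · rintro ⟨⟨hst, hne, hnm⟩, hcond⟩
      simp only [pvCond, Bool.and_eq_true, decide_eq_true_eq] at hcond
      have hpre := hcond.1.1
      have hhd : v.head? = some cs[k] := by
        obtain ⟨t, ht⟩ := hpre
        cases hv2 : v with
        | nil => exact absurd hv2 hne
        | cons a r =>
          rw [hv2] at ht
          have : (cs.drop k).head? = some a := by rw [← ht]; rfl
          rw [List.head?_drop] at this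
          rw [List.getElem?_eq_getElem hkn] at this
          simp only [Option.some_inj] at this
          simp [this]
      refine ⟨⟨hst, hne, hnm, hhd⟩, ?_⟩
      have hslice : PySem.List.slice cs (some ((k:Nat):Int)) (some (((k:Nat):Int) + ((v.length : Nat) : Int)))
          = (cs.drop k).take v.length := PySem.List.slice_natCast_add cs k v.length
      simp only [Bool.and_eq_true, beq_iff_eq]
      refine ⟨by rw [hslice]; exact (List.prefix_iff_eq_take.mp hpre).symm, ?_⟩
      rw [bNotIdent_eq_pvBoundary]
      exact hcond.2
  · rw [if_neg hbefore]
    have hcnt0 : varsA.countP (fun v => pvCond cs v k) = 0 := by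
      rw [List.countP_eq_zero]
      intro v _
      simp only [pvCond]
      have : pvBoundary (PySem.List.pyGet? cs (((k : Nat) : Int) - 1)) = false := by
        rw [← bNotIdent_eq_pvBoundary]
        simpa using hbefore
      simp [this]
    rw [hcnt0]
    rfl

-- B's whole emit loop, as a flatMap of per-position pieces
lemma bEmit_fold (cs : List Char) (byfirst : PySem.Dict Char (PySem.Set (List Char)))
    (piece : Nat → List Char)
    (hbody : ∀ (acc : List Char) (k : Nat), k < cs.length →
      bEmit cs byfirst acc ((k : Nat) : Int) = acc ++ piece k) :
    ∀ (l : List Nat) (init : List Char), (∀ k ∈ l, k < cs.length) →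
    l.foldl (fun acc k => bEmit cs byfirst acc ((k : Nat) : Int)) init
      = init ++ l.flatMap piece := by
  intro l
  induction l with
  | nil => intro init _; simp
  | cons k t iht =>
    intro init hbd'
    rw [List.foldl_cons, hbody init k (hbd' k List.mem_cons_self)]
    rw [iht _ (fun q hq => hbd' q (List.mem_cons_of_mem _ hq))]
    simp [List.append_assoc]

-- ===== VERDICT (by name: the statement is the Claim_ definition above) =====
set_option maxHeartbeats 2000000 in
theorem extract_variable_spec : Claim_equal_extract_variable := by
  intro expression variable_name _
  simp only [Spec_extract_variable, extract_variable, extract_variable_alt]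
  set cs := (PySem.Str.replace expression " " "").toList ++ [' '] with hcs
  set names := variable_name.map String.toList with hnames
  set n := cs.length with hn
  -- ---- the pieces both tokenizers produce ----
  set pieces := pSplit (fun c => decide (c ∈ bDelims)) cs with hpieces
  -- ---- A's vars list ----
  rw [splitOn_eq_pSplit, pSplit_map_translate]
  set stripped := pieces.map PySem.Chars.strip with hstr
  set vars3 := (PySem.Set.ofList stripped).filter (fun v => !v.isEmpty) with hv3
  have hnodup : vars3.Nodup := (PySem.Set.nodup_ofList stripped).filter _
  rw [PySem.Set.inter, PySem.Set.ofList_eq_self_of_nodup vars3 hnodup]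
  rw [List.filter_congr (l := vars3)
    (fun x _ => show ((PySem.Set.ofList names).contains x) = (decide (x ∈ names)) from by
      rw [Bool.eq_iff_iff]
      simp [PySem.Set.contains, PySem.Set.mem_ofList])]
  set varsA := vars3.filter (fun x => decide (x ∈ names)) with hvars
  have hvarsA_nodup : varsA.Nodup := hnodup.filter _
  have hmemA : ∀ v, v ∈ varsA ↔ (v ∈ stripped ∧ v ≠ [] ∧ v ∈ names) := by
    intro v
    rw [hvars, List.mem_filter, hv3, List.mem_filter, PySem.Set.mem_ofList]
    simp only [Bool.not_eq_eq_eq_not, Bool.not_false, decide_eq_true_eq]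
    constructor
    · rintro ⟨⟨h1, h2⟩, h3⟩
      exact ⟨h1, by simpa using h2, h3⟩
    · rintro ⟨h1, h2, h3⟩
      exact ⟨⟨h1, by simpa using h2⟩, h3⟩
  -- ---- B's byfirst dict ----
  rw [bTokens_flush names cs PySem.Dict.empty []]
  rw [consHead_nil_of_ne _ (pSplit_ne_nil _ _)]
  have hBf0 : ∀ h, (Bf PySem.Dict.empty h).Nodup := by
    intro h
    simp [Bf, PySem.Dict.get?_empty]
  obtain ⟨hBnd, hBmem⟩ := byfirst_inv names pieces PySem.Dict.empty hBf0
  set byfirst := pieces.foldl (bNote names) PySem.Dict.empty with hbyf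
  have hBmem' : ∀ h v, v ∈ Bf byfirst h ↔
      (v ∈ stripped ∧ v ≠ [] ∧ v ∈ names ∧ v.head? = some h) := by
    intro h v
    rw [hBmem h v]
    simp [Bf, PySem.Dict.get?_empty, hstr]
  -- ---- A's locations, as counts per position ----
  rw [List.foldl_map]
  simp only [PySem.List.foldl_append_eq_flatMap, List.nil_append]
  set flocs := varsA.flatMap (fun var => aScanVar cs names var) with hflocs
  set locs := PySem.List.sorted flocs (fun x => x) false with hlocs
  have hmemAv : ∀ v ∈ varsA, v ≠ [] ∧ v ∈ names := by
    intro v hv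
    have := (hmemA v).mp hv
    exact ⟨this.2.1, this.2.2⟩
  have hshape : ∀ x ∈ locs, ∃ m : Nat, x = (m : Int) ∧ m < n := by
    intro x hx
    rw [hlocs, PySem.List.mem_sorted, hflocs] at hx
    obtain ⟨v, hv, hxv⟩ := List.mem_flatMap.mp hx
    rw [aScanVar_eq cs v names (hmemAv v hv).1 (hmemAv v hv).2] at hxv
    obtain ⟨m, hm, _, _, hcond⟩ := mem_matchesAux cs v (n + 1) 0 x hxv
    refine ⟨m, hm, ?_⟩
    have hpre : v <+: cs.drop m := by
      have := hcond
      simp only [pvCond, Bool.and_eq_true, decide_eq_true_eq] at this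
      exact this.1.1
    have hlen := hpre.length_le
    have hv1 : 1 ≤ v.length := by
      cases hv2 : v with
      | nil => exact absurd hv2 (hmemAv v hv).1
      | cons a t => simp
    simp only [List.length_drop] at hlen
    omega
  have hcount : ∀ m : Nat, locs.count ((m : Nat) : Int)
      = varsA.countP (fun v => pvCond cs v m) := by
    intro m
    rw [hlocs]
    rw [(PySem.List.sorted_perm flocs (fun x => x) false).count_eq]
    rw [hflocs, count_flatMap_int]
    have hmap : varsA.map (fun v => (aScanVar cs names v).count ((m : Nat) : Int))
        = varsA.map (fun v => if pvCond cs v m then 1 else 0) := by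
      refine List.map_congr_left (fun v hv => ?_)
      rw [aScanVar_eq cs v names (hmemAv v hv).1 (hmemAv v hv).2]
      rw [count_matchesAux cs v (n + 1) 0 m]
      by_cases hc : pvCond cs v m = true
      · rw [if_pos hc]
        split
        · rfl
        · next hno =>
          exfalso
          apply hno
          refine ⟨by omega, ?_, hc⟩
          -- m < n + 1 because a match needs a nonempty prefix of cs.drop m... actually
          -- count is 0 beyond the range; handle directly:
          by_contra hmn
          push_neg at hmn
          have hpre : v <+: cs.drop m := by
            have := hc
            simp only [pvCond, Bool.and_eq_true, decide_eq_true_eq] at this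
            exact this.1.1
          have hlen := hpre.length_le
          have hv1 : 1 ≤ v.length := by
            cases hv2 : v with
            | nil => exact absurd hv2 (hmemAv v hv).1
            | cons a t => simp
          simp only [List.length_drop] at hlen
          omega
      · rw [if_neg hc, if_neg (by intro h; exact hc h.2.2)]
    rw [hmap, sum_map_ite_eq_countP]
  -- ---- natify the sorted locations ----
  obtain ⟨ln, hln⟩ := natify locs (fun x hx => (hshape x hx).imp (fun m hm => hm.1))
  have hlnbd : ∀ q ∈ ln, q < n := by
    intro q hq
    have : ((q : Nat) : Int) ∈ locs := by
      rw [hln]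
      exact List.mem_map_of_mem hq
    obtain ⟨m, hm, hmn⟩ := hshape _ this
    have : q = m := by exact_mod_cast hm
    omega
  have hlnpw : ln.Pairwise (· ≤ ·) := by
    have hpw : locs.Pairwise (· ≤ ·) := PySem.List.sorted_pairwise _ _
    rw [hln, List.pairwise_map] at hpw
    exact hpw.imp (fun h => by exact_mod_cast h)
  have hlncount : ∀ m : Nat, ln.count m = varsA.countP (fun v => pvCond cs v m) := by
    intro m
    rw [← hcount m]
    rw [hln]
    exact (List.count_map_of_injective ln (fun m : Nat => (m : Int))
      Nat.cast_injective m).symm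
  -- ---- A's final splice = per-position flatten ----
  have hAside :
      (locs.foldl (fun (st : List Char × Int) loc =>
          (PySem.List.slice st.1 none (some (loc + st.2 * 5)) ++ "self.".toList
             ++ PySem.List.slice st.1 (some (loc + st.2 * 5)) none, st.2 + 1)) (cs, (0 : Int))).1
        = (List.range' 0 n).flatMap
            (fun p => selfRep (varsA.countP (fun v => pvCond cs v p)) ++ [cs.getD p ' ']) := by
    have hinit : (cs, (0 : Int)) = (([] : List Char) ++ cs.drop ((0 : Int)).toNat, (0 : Int)) := by
      simp
    rw [hinit]
    have hbd : ∀ p ∈ locs, (0 : Int) ≤ p ∧ p ≤ (cs.length : Int) := by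
      intro p hp
      obtain ⟨m, hm, hmn⟩ := hshape p hp
      subst hm
      constructor
      · exact_mod_cast Nat.zero_le m
      · exact_mod_cast Nat.le_of_lt hmn
    have hpw : locs.Pairwise (· ≤ ·) := PySem.List.sorted_pairwise _ _
    rw [buildEq cs locs [] 0 0 hpw hbd le_rfl le_rfl (by simp)]
    rw [hln]
    rw [show ((0 : Int)) = ((0 : Nat) : Int) from rfl]
    rw [pwFold cs ln 0 []]
    rw [pw_flatten cs (ln.length + n) ln 0 (by omega) hlnpw
      (fun q hq => ⟨Nat.zero_le q, hlnbd q hq⟩) (Nat.zero_le n)]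
    simp only [Nat.sub_zero, List.nil_append]
    exact flatMap_congr_mem _ _ _ (fun p _ => by rw [hlncount p])
  rw [hAside]
  -- ---- B's emit loop = the same flatten ----
  rw [PySem.List.pyRange_zero_natCast, List.foldl_map]
  have hBbody := bEmit_flat cs byfirst varsA stripped names hBnd hBmem' hmemA hvarsA_nodup
  rw [bEmit_fold cs byfirst _ hBbody (List.range n) [] (fun k hk => List.mem_range.mp hk)]
  rw [List.nil_append, List.range_eq_range']
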